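-- pv_equiv track=rewrite | github.com/emirks/ytu-ce-cosmos-turkish-e5-large-inference-optimization | src/optimization/optimize_trt_model.py | make_profile_strings
-- ===== SOURCE A (Python) =====
-- from typing import Tuple, Dict, List
--
-- def make_profile_strings(
--     names: List[str],
--     batch_min: int,
--     seq_min: int,
--     batch_opt: int,
--     seq_opt: int,
--     batch_max: int,
--     seq_max: int,
-- ) -> Tuple[str, str, str]:
--     parts = []
--     if any("input_ids" in n for n in names):
--         parts.append(
--             f"input_ids:{batch_min}x{seq_min},{batch_opt}x{seq_opt},{batch_max}x{seq_max}"
--         )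
--     if any("attention_mask" in n for n in names):
--         parts.append(
--             f"attention_mask:{batch_min}x{seq_min},{batch_opt}x{seq_opt},{batch_max}x{seq_max}"
--         )
--     if any("token_type_ids" in n for n in names):
--         parts.append(
--             f"token_type_ids:{batch_min}x{seq_min},{batch_opt}x{seq_opt},{batch_max}x{seq_max}"
--         )
--
--     def reattach(parts_src: List[str], which: int) -> str:
--         out = []
--         for p in parts_src:
--             tname = p.split(":")[0]
--             dims = p.split(",")[which].split(":")[-1]
--             out.append(f"{tname}:{dims}")
--         return ",".join(out)
--
--     mins = reattach(parts, 0)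
--     opts = reattach(parts, 1)
--     maxs = reattach(parts, 2)
--     return mins, opts, maxs
-- ===== SOURCE B (Python) =====
-- def make_profile_strings(names, batch_min, seq_min, batch_opt, seq_opt, batch_max, seq_max):
--     mins, opts, maxs = [], [], []
--     for tname in ("input_ids", "attention_mask", "token_type_ids"):
--         if any(tname in n for n in names):
--             mins.append(f"{tname}:{batch_min}x{seq_min}")
--             opts.append(f"{tname}:{batch_opt}x{seq_opt}")
--             maxs.append(f"{tname}:{batch_max}x{seq_max}")
--     return ",".join(mins), ",".join(opts), ",".join(maxs)
-- ===== Notes on version B (the rewrite author's own statement) =====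
-- stated objective: simpler
-- what changed: B builds the three per-profile dimension strings directly in one pass over the three tensor names, instead of A's detour of building combined strings and re-parsing them with split(':')/split(',') in a reattach helper.
import Mathlib
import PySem

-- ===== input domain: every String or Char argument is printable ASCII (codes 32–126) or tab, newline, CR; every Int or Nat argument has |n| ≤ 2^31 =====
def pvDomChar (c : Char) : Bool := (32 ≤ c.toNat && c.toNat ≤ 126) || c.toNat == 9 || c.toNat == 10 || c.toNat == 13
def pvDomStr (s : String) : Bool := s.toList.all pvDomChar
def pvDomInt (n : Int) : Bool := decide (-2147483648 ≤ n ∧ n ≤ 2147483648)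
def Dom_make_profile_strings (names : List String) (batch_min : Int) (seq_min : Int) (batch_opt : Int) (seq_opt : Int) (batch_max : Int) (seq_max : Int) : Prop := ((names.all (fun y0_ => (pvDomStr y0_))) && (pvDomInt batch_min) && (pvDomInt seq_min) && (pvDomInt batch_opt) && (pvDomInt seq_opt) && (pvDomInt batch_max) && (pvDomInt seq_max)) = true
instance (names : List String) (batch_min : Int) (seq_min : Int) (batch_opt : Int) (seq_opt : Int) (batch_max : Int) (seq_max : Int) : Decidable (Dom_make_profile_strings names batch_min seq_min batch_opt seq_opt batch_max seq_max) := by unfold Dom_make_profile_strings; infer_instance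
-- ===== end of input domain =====

-- B replaces A's format-then-reparse detour (combined strings re-split by the reattach helper)
-- with one pass that builds the three per-profile strings directly; objective: simpler.

-- ===== PORT A =====

-- p.split(":")[0], p.split(",")[which].split(":")[-1]; the .getD defaults are never taken on the
-- strings A feeds this helper (split of a nonempty-separator is never empty, indices are in range).
def pvReattachOne (p : String) (which : Int) : String :=
  let tname := (PySem.List.pyGet? ((PySem.Str.split? p ":").getD []) 0).getD ""
  let piece := (PySem.List.pyGet? ((PySem.Str.split? p ",").getD []) which).getD ""
  let dims := (PySem.List.pyGet? ((PySem.Str.split? piece ":").getD []) (-1)).getD ""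
  tname ++ ":" ++ dims

def pvReattach (parts : List String) (which : Int) : String :=
  PySem.Str.join "," (parts.foldl (fun out p => out ++ [pvReattachOne p which]) [])

def make_profile_strings (names : List String) (batch_min : Int) (seq_min : Int) (batch_opt : Int) (seq_opt : Int) (batch_max : Int) (seq_max : Int) : String × String × String :=
  let parts : List String := []
  let parts := if names.any (fun n => PySem.Str.isIn "input_ids" n) then
      parts ++ ["input_ids:" ++ PySem.Int.toStr batch_min ++ "x" ++ PySem.Int.toStr seq_min ++ "," ++ PySem.Int.toStr batch_opt ++ "x" ++ PySem.Int.toStr seq_opt ++ "," ++ PySem.Int.toStr batch_max ++ "x" ++ PySem.Int.toStr seq_max]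
    else parts
  let parts := if names.any (fun n => PySem.Str.isIn "attention_mask" n) then
      parts ++ ["attention_mask:" ++ PySem.Int.toStr batch_min ++ "x" ++ PySem.Int.toStr seq_min ++ "," ++ PySem.Int.toStr batch_opt ++ "x" ++ PySem.Int.toStr seq_opt ++ "," ++ PySem.Int.toStr batch_max ++ "x" ++ PySem.Int.toStr seq_max]
    else parts
  let parts := if names.any (fun n => PySem.Str.isIn "token_type_ids" n) then
      parts ++ ["token_type_ids:" ++ PySem.Int.toStr batch_min ++ "x" ++ PySem.Int.toStr seq_min ++ "," ++ PySem.Int.toStr batch_opt ++ "x" ++ PySem.Int.toStr seq_opt ++ "," ++ PySem.Int.toStr batch_max ++ "x" ++ PySem.Int.toStr seq_max]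
    else parts
  (pvReattach parts 0, pvReattach parts 1, pvReattach parts 2)

-- ===== PORT B =====

def make_profile_strings_alt (names : List String) (batch_min : Int) (seq_min : Int) (batch_opt : Int) (seq_opt : Int) (batch_max : Int) (seq_max : Int) : String × String × String :=
  let st := ["input_ids", "attention_mask", "token_type_ids"].foldl
    (fun (st : List String × List String × List String) t =>
      if names.any (fun n => PySem.Str.isIn t n) then
        (st.1 ++ [t ++ ":" ++ PySem.Int.toStr batch_min ++ "x" ++ PySem.Int.toStr seq_min],
         st.2.1 ++ [t ++ ":" ++ PySem.Int.toStr batch_opt ++ "x" ++ PySem.Int.toStr seq_opt],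
         st.2.2 ++ [t ++ ":" ++ PySem.Int.toStr batch_max ++ "x" ++ PySem.Int.toStr seq_max])
      else st)
    ([], [], [])
  (PySem.Str.join "," st.1, PySem.Str.join "," st.2.1, PySem.Str.join "," st.2.2)

-- ===== PRECONDITION & SPEC =====
def Spec_make_profile_strings (names : List String) (batch_min : Int) (seq_min : Int) (batch_opt : Int) (seq_opt : Int) (batch_max : Int) (seq_max : Int) (out : String × String × String) : Prop := out = make_profile_strings_alt names batch_min seq_min batch_opt seq_opt batch_max seq_max
instance (names : List String) (batch_min : Int) (seq_min : Int) (batch_opt : Int) (seq_opt : Int) (batch_max : Int) (seq_max : Int) (out : String × String × String) : Decidable (Spec_make_profile_strings names batch_min seq_min batch_opt seq_opt batch_max seq_max out) := by unfold Spec_make_profile_strings; infer_instance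

-- ===== CLAIM (what is proved, stated in full; the proofs are below) =====
def Claim_equal_make_profile_strings : Prop := ∀ (names : List String) (batch_min : Int) (seq_min : Int) (batch_opt : Int) (seq_opt : Int) (batch_max : Int) (seq_max : Int), Dom_make_profile_strings names batch_min seq_min batch_opt seq_opt batch_max seq_max → Spec_make_profile_strings names batch_min seq_min batch_opt seq_opt batch_max seq_max (make_profile_strings names batch_min seq_min batch_opt seq_opt batch_max seq_max)

-- ===== LEMMAS AND PROOFS =====

-- splitOn.go scans past characters that are not the (single-char) separator
theorem pv_go_no_sep (c : Char) : ∀ (fuel : Nat) (l cur : List Char) (acc : List (List Char)), c ∉ l →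
    PySem.Chars.splitOn.go [c] fuel l cur acc = ((cur.reverse ++ l) :: acc).reverse := by
  intro fuel
  induction fuel with
  | zero => intro l cur acc _; rw [PySem.Chars.splitOn.go]
  | succ fuel ih =>
    intro l cur acc h
    cases l with
    | nil =>
      rw [PySem.Chars.splitOn.go]
      all_goals simp
    | cons a rest =>
      rw [PySem.Chars.splitOn.go]
      have ha : ¬ (c = a) := fun hca => h (hca ▸ List.mem_cons_self)
      simp only [List.isPrefixOf, Bool.and_eq_true, beq_iff_eq, and_true]
      rw [if_neg ha]
      rw [ih rest (a :: cur) acc (fun hm => h (List.mem_cons_of_mem a hm))]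
      simp

-- splitOn.go consumes a clean chunk up to the first separator occurrence
theorem pv_go_sep (c : Char) : ∀ (u : List Char) (fuel : Nat) (v cur : List Char) (acc : List (List Char)), c ∉ u →
    PySem.Chars.splitOn.go [c] (u.length + 1 + fuel) (u ++ c :: v) cur acc
      = PySem.Chars.splitOn.go [c] fuel v [] ((cur.reverse ++ u) :: acc) := by
  intro u
  induction u with
  | nil =>
    intro fuel v cur acc _
    have hl : ([] : List Char).length + 1 + fuel = fuel + 1 := by simp; omega
    rw [hl]
    simp only [List.nil_append]
    rw [PySem.Chars.splitOn.go]
    simp [List.isPrefixOf]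
  | cons a u' ih =>
    intro fuel v cur acc h
    have ha : ¬ (c = a) := fun hca => h (hca ▸ List.mem_cons_self)
    have : (a :: u').length + 1 + fuel = (u'.length + 1 + fuel) + 1 := by simp [List.length_cons]; omega
    rw [this]
    simp only [List.cons_append]
    rw [PySem.Chars.splitOn.go]
    simp only [List.isPrefixOf, Bool.and_eq_true, beq_iff_eq, and_true]
    rw [if_neg ha]
    rw [ih fuel v (a :: cur) acc (fun hm => h (List.mem_cons_of_mem a hm))]
    simp

theorem pv_splitOn_one (c : Char) (s : List Char) (h : c ∉ s) :
    PySem.Chars.splitOn s [c] = [s] := by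
  unfold PySem.Chars.splitOn
  rw [pv_go_no_sep c _ s [] [] h]; simp

theorem pv_splitOn_two (c : Char) (u v : List Char) (hu : c ∉ u) (hv : c ∉ v) :
    PySem.Chars.splitOn (u ++ c :: v) [c] = [u, v] := by
  unfold PySem.Chars.splitOn
  have hl : (u ++ c :: v).length + 1 = u.length + 1 + (v.length + 1) := by simp; omega
  rw [hl, pv_go_sep c u (v.length + 1) v [] [] hu]
  rw [pv_go_no_sep c _ v [] _ hv]; simp

theorem pv_splitOn_three (c : Char) (u v w : List Char) (hu : c ∉ u) (hv : c ∉ v) (hw : c ∉ w) :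
    PySem.Chars.splitOn (u ++ c :: (v ++ c :: w)) [c] = [u, v, w] := by
  unfold PySem.Chars.splitOn
  have hl : (u ++ c :: (v ++ c :: w)).length + 1 = u.length + 1 + (v.length + 1 + (w.length + 1)) := by simp; omega
  rw [hl, pv_go_sep c u _ (v ++ c :: w) [] [] hu]
  rw [pv_go_sep c v (w.length + 1) w [] _ hv]
  rw [pv_go_no_sep c _ w [] _ hw]; simp

-- str(n) consists of digits and '-' only
theorem pv_toChars_not_mem (n : Int) (c : Char) (hd : c.isDigit = false) (hm : c ≠ '-') :
    c ∉ PySem.Int.toChars n := by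
  unfold PySem.Int.toChars
  split
  · intro h
    rcases List.mem_cons.mp h with h | h
    · exact hm h
    · exact absurd (Nat.isDigit_of_mem_toDigits (by norm_num) (by norm_num) h) (by simp [hd])
  · intro h
    exact absurd (Nat.isDigit_of_mem_toDigits (by norm_num) (by norm_num) h) (by simp [hd])

theorem pv_dims_not_colon (a b : Int) : ':' ∉ PySem.Int.toChars a ++ 'x' :: PySem.Int.toChars b := by
  intro h
  rcases List.mem_append.mp h with h | h
  · exact pv_toChars_not_mem a ':' (by decide) (by decide) h
  · rcases List.mem_cons.mp h with h | h
    · exact absurd h (by decide)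
    · exact pv_toChars_not_mem b ':' (by decide) (by decide) h

theorem pv_dims_not_comma (a b : Int) : ',' ∉ PySem.Int.toChars a ++ 'x' :: PySem.Int.toChars b := by
  intro h
  rcases List.mem_append.mp h with h | h
  · exact pv_toChars_not_mem a ',' (by decide) (by decide) h
  · rcases List.mem_cons.mp h with h | h
    · exact absurd h (by decide)
    · exact pv_toChars_not_mem b ',' (by decide) (by decide) h

-- a char distinct from the separators is in none of the comma-joined dims segments
theorem pv_not_mem_rest (c : Char) (A O M : List Char) (hc : c ≠ ',')
    (h1 : c ∉ A) (h2 : c ∉ O) (h3 : c ∉ M) : c ∉ A ++ ',' :: (O ++ ',' :: M) := by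
  simp only [List.mem_append, List.mem_cons, not_or]
  exact ⟨h1, hc, h2, hc, h3⟩

-- reattach of one well-formed combined string recovers tname:dims
theorem pv_reattachOne_eq (s t : String) (a b o p m q : Int)
    (hs : s.toList = t.toList ++ [':'])
    (htc : ':' ∉ t.toList) (htm : ',' ∉ t.toList) :
    (pvReattachOne (s ++ PySem.Int.toStr a ++ "x" ++ PySem.Int.toStr b ++ "," ++ PySem.Int.toStr o ++ "x" ++ PySem.Int.toStr p ++ "," ++ PySem.Int.toStr m ++ "x" ++ PySem.Int.toStr q) 0
        = t ++ ":" ++ PySem.Int.toStr a ++ "x" ++ PySem.Int.toStr b)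
    ∧ (pvReattachOne (s ++ PySem.Int.toStr a ++ "x" ++ PySem.Int.toStr b ++ "," ++ PySem.Int.toStr o ++ "x" ++ PySem.Int.toStr p ++ "," ++ PySem.Int.toStr m ++ "x" ++ PySem.Int.toStr q) 1
        = t ++ ":" ++ PySem.Int.toStr o ++ "x" ++ PySem.Int.toStr p)
    ∧ (pvReattachOne (s ++ PySem.Int.toStr a ++ "x" ++ PySem.Int.toStr b ++ "," ++ PySem.Int.toStr o ++ "x" ++ PySem.Int.toStr p ++ "," ++ PySem.Int.toStr m ++ "x" ++ PySem.Int.toStr q) 2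
        = t ++ ":" ++ PySem.Int.toStr m ++ "x" ++ PySem.Int.toStr q) := by
  set A := PySem.Int.toChars a ++ 'x' :: PySem.Int.toChars b with hA
  set O := PySem.Int.toChars o ++ 'x' :: PySem.Int.toChars p with hO
  set M := PySem.Int.toChars m ++ 'x' :: PySem.Int.toChars q with hM
  have hAc : ':' ∉ A := pv_dims_not_colon a b
  have hOc : ':' ∉ O := pv_dims_not_colon o p
  have hMc : ':' ∉ M := pv_dims_not_colon m q
  have hAm : ',' ∉ A := pv_dims_not_comma a b
  have hOm : ',' ∉ O := pv_dims_not_comma o p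
  have hMm : ',' ∉ M := pv_dims_not_comma m q
  have hPL : (s ++ PySem.Int.toStr a ++ "x" ++ PySem.Int.toStr b ++ "," ++ PySem.Int.toStr o ++ "x" ++ PySem.Int.toStr p ++ "," ++ PySem.Int.toStr m ++ "x" ++ PySem.Int.toStr q).toList
      = t.toList ++ ':' :: (A ++ ',' :: (O ++ ',' :: M)) := by
    simp [String.toList_append, hs, PySem.Int.toList_toStr, hA, hO, hM]
  have hColon : PySem.Chars.splitOn ((s ++ PySem.Int.toStr a ++ "x" ++ PySem.Int.toStr b ++ "," ++ PySem.Int.toStr o ++ "x" ++ PySem.Int.toStr p ++ "," ++ PySem.Int.toStr m ++ "x" ++ PySem.Int.toStr q).toList) [':']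
      = [t.toList, A ++ ',' :: (O ++ ',' :: M)] := by
    rw [hPL]
    exact pv_splitOn_two ':' _ _ htc
      (pv_not_mem_rest ':' A O M (by decide) hAc hOc hMc)
  have hComma : PySem.Chars.splitOn ((s ++ PySem.Int.toStr a ++ "x" ++ PySem.Int.toStr b ++ "," ++ PySem.Int.toStr o ++ "x" ++ PySem.Int.toStr p ++ "," ++ PySem.Int.toStr m ++ "x" ++ PySem.Int.toStr q).toList) [',']
      = [t.toList ++ ':' :: A, O, M] := by
    have h2 : (s ++ PySem.Int.toStr a ++ "x" ++ PySem.Int.toStr b ++ "," ++ PySem.Int.toStr o ++ "x" ++ PySem.Int.toStr p ++ "," ++ PySem.Int.toStr m ++ "x" ++ PySem.Int.toStr q).toList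
        = (t.toList ++ ':' :: A) ++ ',' :: (O ++ ',' :: M) := by
      rw [hPL]; simp
    rw [h2]
    refine pv_splitOn_three ',' _ _ _ ?_ hOm hMm
    intro hmem
    rcases List.mem_append.mp hmem with h | h
    · exact htm h
    · rcases List.mem_cons.mp h with h | h
      · exact absurd h (by decide)
      · exact hAm h
  have hPieceA : PySem.Chars.splitOn (t.toList ++ ':' :: A) [':'] = [t.toList, A] :=
    pv_splitOn_two ':' _ _ htc hAc
  refine ⟨?_, ?_, ?_⟩ <;>
    · unfold pvReattachOne
      simp only [PySem.Str.split?, PySem.Chars.split?]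
      rw [show (":" : String).toList = [':'] from rfl, show ("," : String).toList = [','] from rfl]
      simp only [List.isEmpty_cons, Option.getD_some, Option.map_some, ite_false, Bool.false_eq_true]
      rw [hColon, hComma]
      simp only [List.map_cons, List.map_nil, PySem.List.pyGet?, PySem.List.pyIdx?]
      norm_num [show Int.toNat 0 = 0 from rfl, show Int.toNat 1 = 1 from rfl,
        show Int.toNat 2 = 2 from rfl, List.getElem_cons_zero, List.getElem_cons_succ,
        String.toList_ofList]
      first
        | rw [hPieceA]
        | rw [pv_splitOn_one ':' O hOc]
        | rw [pv_splitOn_one ':' M hMc]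
      norm_num [String.toList_ofList]
      refine String.toList_inj.mp ?_
      simp [String.toList_append, PySem.Int.toList_toStr, hA, hO, hM]

-- ===== VERDICT (by name: the statement is the Claim_ definition above) =====
theorem make_profile_strings_spec : Claim_equal_make_profile_strings := by
  intro names a b o p m q _
  unfold Spec_make_profile_strings make_profile_strings make_profile_strings_alt pvReattach
  have e1 := pv_reattachOne_eq "input_ids:" "input_ids" a b o p m q (by decide) (by decide) (by decide)
  have e2 := pv_reattachOne_eq "attention_mask:" "attention_mask" a b o p m q (by decide) (by decide) (by decide)
  have e3 := pv_reattachOne_eq "token_type_ids:" "token_type_ids" a b o p m q (by decide) (by decide) (by decide)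
  rcases Bool.eq_false_or_eq_true (names.any fun n => PySem.Str.isIn "input_ids" n) with h1 | h1 <;>
  rcases Bool.eq_false_or_eq_true (names.any fun n => PySem.Str.isIn "attention_mask" n) with h2 | h2 <;>
  rcases Bool.eq_false_or_eq_true (names.any fun n => PySem.Str.isIn "token_type_ids" n) with h3 | h3 <;>
  simp only [h1, h2, h3, if_true, if_false, Bool.false_eq_true, List.foldl_cons, List.foldl_nil,
    List.nil_append, List.append_nil, List.singleton_append, List.cons_append, List.map_cons,
    e1.1, e1.2.1, e1.2.2, e2.1, e2.2.1, e2.2.2, e3.1, e3.2.1, e3.2.2]
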